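-- pv_equiv track=rewrite | github.com/MrBrantCode/unitest_baseline | mut_generate/mist_train_taco/taco_15934/solution.py | is_balanced_string
-- ===== SOURCE A (Python) =====
-- def is_balanced_string(n, operations):
--     s = 0
--     f = 0
--     for p, x in operations:
--         x = int(x)
--         if p == '(':
--             s += x
--         else:
--             s -= x
--             if s < 0:
--                 f = 1
--     if f or s != 0:
--         return 'NO'
--     else:
--         return 'YES'
-- ===== SOURCE B (Python) =====
-- def is_balanced_string(n, operations):
--     deltas = [int(x) if p == '(' else -int(x) for p, x in operations]
--     t = 0
--     totals = []
--     for d in deltas: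
--         t += d
--         totals.append(t)
--     bad = any(tt < 0 for tt, (p, _) in zip(totals, operations) if p != '(')
--     return 'NO' if bad or t != 0 else 'YES'
-- ===== Notes on version B (the rewrite author's own statement) =====
-- stated objective: alternative
-- what changed: Replaces A's single stateful loop carrying a sum and a sticky failure flag with a two-pass decomposition: a signed-delta list, its prefix-sum list, and an any() over prefix sums zipped with operations gated on ')' positions.
import Mathlib
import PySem

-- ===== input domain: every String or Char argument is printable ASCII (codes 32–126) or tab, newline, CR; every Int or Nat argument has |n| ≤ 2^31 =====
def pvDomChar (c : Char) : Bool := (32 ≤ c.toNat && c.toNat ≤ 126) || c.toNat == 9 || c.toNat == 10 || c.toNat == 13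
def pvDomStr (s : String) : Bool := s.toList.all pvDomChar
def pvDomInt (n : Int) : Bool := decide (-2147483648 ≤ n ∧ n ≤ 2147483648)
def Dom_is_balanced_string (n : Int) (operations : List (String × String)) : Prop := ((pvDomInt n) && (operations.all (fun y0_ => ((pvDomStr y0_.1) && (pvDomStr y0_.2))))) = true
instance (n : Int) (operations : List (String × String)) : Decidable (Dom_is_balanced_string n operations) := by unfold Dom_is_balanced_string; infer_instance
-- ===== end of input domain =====

-- B replaces A's single stateful loop (sum + sticky flag) with a two-pass decomposition:
-- a signed-delta list, its prefix-sum list, and an any() over prefix sums at ')' positions.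


-- ===== PORT A =====
def is_balanced_string (n : Int) (operations : List (String × String)) : String :=
  let st := operations.foldl (fun (st : Int × Int) q =>
    let x := (PySem.Int.ofStr? q.2).getD 0   -- int(x); Pre_ guarantees it parses
    if q.1 == "(" then (st.1 + x, st.2)
    else
      let s := st.1 - x
      (s, if s < 0 then 1 else st.2)) (0, 0)
  if st.2 ≠ 0 ∨ st.1 ≠ 0 then "NO" else "YES"

-- ===== PORT B =====
def is_balanced_string_alt (n : Int) (operations : List (String × String)) : String :=
  let deltas := operations.map (fun q =>
    let v := (PySem.Int.ofStr? q.2).getD 0   -- int(x); Pre_ guarantees it parses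
    if q.1 == "(" then v else -v)
  let tp := deltas.foldl (fun (st : Int × List Int) d => (st.1 + d, st.2 ++ [st.1 + d])) (0, [])
  let bad := (tp.2.zip operations).any (fun z => z.2.1 != "(" && decide (z.1 < 0))
  if bad || decide (tp.1 ≠ 0) then "NO" else "YES"

-- ===== PRECONDITION & SPEC =====
-- Pre_ excludes exactly the inputs where int(x) raises ValueError in A (a non-integer string)
def Pre_is_balanced_string (n : Int) (operations : List (String × String)) : Prop :=
  operations.all (fun q => (PySem.Int.ofStr? q.2).isSome) = true
instance (n : Int) (operations : List (String × String)) : Decidable (Pre_is_balanced_string n operations) := by unfold Pre_is_balanced_string; infer_instance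
def pvWitness_is_balanced_string : Int × (List (String × String)) := (2, [("(", "3"), (")", "3")])

def Spec_is_balanced_string (n : Int) (operations : List (String × String)) (out : String) : Prop := out = is_balanced_string_alt n operations
instance (n : Int) (operations : List (String × String)) (out : String) : Decidable (Spec_is_balanced_string n operations out) := by unfold Spec_is_balanced_string; infer_instance

-- ===== CLAIM (what is proved, stated in full; the proofs are below) =====
def Claim_equal_is_balanced_string : Prop := ∀ (n : Int) (operations : List (String × String)), Dom_is_balanced_string n operations → Pre_is_balanced_string n operations → Spec_is_balanced_string n operations (is_balanced_string n operations)

-- ===== LEMMAS AND PROOFS =====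

-- named copies of the two loop bodies (definitionally equal to the ports' lambdas)
def pvStepA (st : Int × Int) (q : String × String) : Int × Int :=
  let x := (PySem.Int.ofStr? q.2).getD 0
  if q.1 == "(" then (st.1 + x, st.2)
  else
    let s := st.1 - x
    (s, if s < 0 then 1 else st.2)

def pvStepB (st : Int × List Int) (d : Int) : Int × List Int := (st.1 + d, st.2 ++ [st.1 + d])

-- delta of one operation (named copy of B's map lambda)
def pvDelta (q : String × String) : Int :=
  let v := (PySem.Int.ofStr? q.2).getD 0
  if q.1 == "(" then v else -v

-- running totals starting from t
def pvRunTot (t : Int) : List (String × String) → List Int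
  | [] => []
  | q :: r => (t + pvDelta q) :: pvRunTot (t + pvDelta q) r

-- A's flag as a predicate: some ')' step leaves the sum negative
def pvBad (s : Int) : List (String × String) → Bool
  | [] => false
  | q :: r =>
    let x := (PySem.Int.ofStr? q.2).getD 0
    if q.1 == "(" then pvBad (s + x) r
    else decide (s - x < 0) || pvBad (s - x) r

lemma pvA_loop (ops : List (String × String)) : ∀ (s f : Int),
    ops.foldl pvStepA (s, f)
    = (s + (ops.map pvDelta).sum, if pvBad s ops then 1 else f) := by
  induction ops with
  | nil => intro s f; simp [pvBad]
  | cons q r ih =>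
    intro s f
    set x := (PySem.Int.ofStr? q.2).getD 0 with hx
    rw [List.foldl_cons]
    by_cases hq : q.1 == "("
    · have h1 : pvStepA (s, f) q = (s + x, f) := by simp [pvStepA, ← hx, hq]
      have h2 : pvDelta q = x := by simp [pvDelta, ← hx, hq]
      rw [h1, ih]
      simp only [List.map_cons, List.sum_cons, pvBad, ← hx, hq, if_pos, Prod.mk.injEq, h2]
      exact ⟨by ring, trivial⟩
    · have h1 : pvStepA (s, f) q = (s - x, if s - x < 0 then 1 else f) := by
        simp [pvStepA, ← hx, hq]
      have h2 : pvDelta q = -x := by simp [pvDelta, ← hx, hq]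
      rw [h1, ih]
      simp only [List.map_cons, List.sum_cons, pvBad, ← hx, hq, if_neg, Bool.false_eq_true,
        if_false, Prod.mk.injEq, h2]
      refine ⟨by ring, ?_⟩
      by_cases hneg : s - x < 0
      · simp [hneg]
      · simp [hneg]

lemma pvB_loop (ops : List (String × String)) : ∀ (t : Int) (acc : List Int),
    (ops.map pvDelta).foldl pvStepB (t, acc)
    = (t + (ops.map pvDelta).sum, acc ++ pvRunTot t ops) := by
  induction ops with
  | nil => intro t acc; simp [pvRunTot]
  | cons q r ih =>
    intro t acc
    rw [List.map_cons, List.foldl_cons]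
    have h1 : pvStepB (t, acc) (pvDelta q) = (t + pvDelta q, acc ++ [t + pvDelta q]) := rfl
    rw [h1, ih]
    simp only [List.sum_cons, pvRunTot, Prod.mk.injEq]
    exact ⟨by ring, by simp⟩

lemma pvB_any (ops : List (String × String)) : ∀ (t : Int),
    ((pvRunTot t ops).zip ops).any (fun z => z.2.1 != "(" && decide (z.1 < 0)) = pvBad t ops := by
  induction ops with
  | nil => intro t; simp [pvRunTot, pvBad]
  | cons q r ih =>
    intro t
    set x := (PySem.Int.ofStr? q.2).getD 0 with hx
    rw [pvRunTot, List.zip_cons_cons, List.any_cons, ih]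
    by_cases hq : q.1 == "("
    · have h2 : pvDelta q = x := by simp [pvDelta, ← hx, hq]
      have hp : (q.1 != "(" && decide (t + x < 0)) = false := by simp [bne, hq]
      simp only [h2, hp, Bool.false_or, pvBad, ← hx, hq, if_pos]
    · have h2 : pvDelta q = -x := by simp [pvDelta, ← hx, hq]
      have ht : t + pvDelta q = t - x := by rw [h2]; ring
      have hp : (q.1 != "(") = true := by simp [bne, hq]
      simp only [ht, hp, Bool.true_and, pvBad, ← hx, hq, Bool.false_eq_true, if_false]

-- ===== VERDICT (by name: the statement is the Claim_ definition above) =====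
theorem is_balanced_string_spec : Claim_equal_is_balanced_string := by
  intro n ops _ _
  unfold Spec_is_balanced_string
  have hA : is_balanced_string n ops =
      (let st := ops.foldl pvStepA (0, 0)
       if st.2 ≠ 0 ∨ st.1 ≠ 0 then "NO" else "YES") := rfl
  have hB : is_balanced_string_alt n ops =
      (let tp := (ops.map pvDelta).foldl pvStepB (0, [])
       let bad := (tp.2.zip ops).any (fun z => z.2.1 != "(" && decide (z.1 < 0))
       if bad || decide (tp.1 ≠ 0) then "NO" else "YES") := rfl
  rw [hA, hB]
  simp only [pvA_loop, pvB_loop, List.nil_append, pvB_any]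
  by_cases hb : pvBad 0 ops <;>
    by_cases hs : (0 : Int) + (ops.map pvDelta).sum = 0 <;>
      simp [hb, hs]
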